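-- pv_equiv track=rewrite | github.com/varun21vaidya/DS-Algo | 0944-delete-columns-to-make-sorted/0944-delete-columns-to-make-sorted.py | minDeletionSize
-- ===== SOURCE A (Python) =====
-- from typing import List
--
-- def minDeletionSize(strs: List[str]) -> int:
--     n=len(strs)
--     m=len(strs[0])
--     sor=[]
--     ans=0
--     for i in range(m):
--         s=""
--         for j in range(n):
--             s+=strs[j][i]
--         if s!="".join(sorted(s)):
--             ans+=1
--     return ans
-- ===== SOURCE B (Python) =====
-- from typing import List
--
-- def minDeletionSize(strs: List[str]) -> int:
--     n = len(strs)
--     m = len(strs[0])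
--     bad = [False] * m
--     ans = 0
--     for j in range(n - 1):
--         r1, r2 = strs[j], strs[j + 1]
--         for i in range(m):
--             if not bad[i] and r1[i] > r2[i]:
--                 bad[i] = True
--                 ans += 1
--     return ans
-- ===== Notes on version B (the rewrite author's own statement) =====
-- stated objective: alternative
-- what changed: Replaces A's column-major gather of each column into a string compared against its sorted copy by a single row-major sweep over adjacent row pairs that maintains a bad-column boolean array and counts a column at its first order violation.
import Mathlib
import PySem

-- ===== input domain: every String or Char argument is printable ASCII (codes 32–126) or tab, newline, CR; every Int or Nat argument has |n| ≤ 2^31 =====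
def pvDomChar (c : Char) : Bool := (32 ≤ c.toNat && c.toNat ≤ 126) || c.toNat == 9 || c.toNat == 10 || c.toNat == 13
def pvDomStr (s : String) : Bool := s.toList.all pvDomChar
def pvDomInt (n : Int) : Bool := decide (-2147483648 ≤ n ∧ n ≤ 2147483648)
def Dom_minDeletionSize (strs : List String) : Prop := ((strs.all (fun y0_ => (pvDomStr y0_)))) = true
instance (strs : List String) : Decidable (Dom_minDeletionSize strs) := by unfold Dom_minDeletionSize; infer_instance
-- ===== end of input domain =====

-- B replaces A's column-major gather-each-column-and-compare-to-its-sort by a row-major sweep over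
-- adjacent row pairs maintaining a bad-column boolean array; equal cost, different traversal (objective: alternative).

-- ===== PORT A =====
def minDeletionSize (strs : List String) : Int :=
  let n : Int := strs.length
  let m : Int := PySem.Str.len ((PySem.List.pyGet? strs 0).getD "")
  (PySem.List.pyRange 0 m 1).foldl (fun ans i =>
    let s : List Char := (PySem.List.pyRange 0 n 1).foldl
      (fun s j => s ++ [(PySem.Str.pyGet? ((PySem.List.pyGet? strs j).getD "") i).getD ' ']) []
    if s ≠ PySem.List.sorted s (fun c => c) then ans + 1 else ans) 0

-- ===== PORT B =====
def minDeletionSize_alt (strs : List String) : Int :=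
  let n : Int := strs.length
  let m : Int := PySem.Str.len ((PySem.List.pyGet? strs 0).getD "")
  let res := (PySem.List.pyRange 0 (n - 1) 1).foldl (fun st j =>
    let r1 := (PySem.List.pyGet? strs j).getD ""
    let r2 := (PySem.List.pyGet? strs (j + 1)).getD ""
    (PySem.List.pyRange 0 m 1).foldl (fun st i =>
      if !(PySem.List.pyGetD st.1 i false) &&
         decide ((PySem.Str.pyGet? r2 i).getD ' ' < (PySem.Str.pyGet? r1 i).getD ' ')
      then (PySem.List.pySetD st.1 i true, st.2 + 1) else st) st)
    (List.replicate m.toNat false, (0 : Int))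
  res.2

-- ===== PRECONDITION & SPEC =====
-- Pre_ excludes exactly the inputs where the Python A raises IndexError: an empty list (strs[0]),
-- and lists in which some row is shorter than the first row (strs[j][i] for i < len(strs[0])).
def Pre_minDeletionSize (strs : List String) : Prop :=
  strs ≠ [] ∧ ∀ s ∈ strs, (strs.headD "").toList.length ≤ s.toList.length
instance (strs : List String) : Decidable (Pre_minDeletionSize strs) := by
  unfold Pre_minDeletionSize; infer_instance
def pvWitness_minDeletionSize : List String := ["cba", "daf", "ghi"]
def Spec_minDeletionSize (strs : List String) (out : Int) : Prop := out = minDeletionSize_alt strs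
instance (strs : List String) (out : Int) : Decidable (Spec_minDeletionSize strs out) := by
  unfold Spec_minDeletionSize; infer_instance

-- ===== CLAIM (what is proved, stated in full; the proofs are below) =====
def Claim_equal_minDeletionSize : Prop := ∀ (strs : List String), Dom_minDeletionSize strs → Pre_minDeletionSize strs → Spec_minDeletionSize strs (minDeletionSize strs)

-- ===== LEMMAS AND PROOFS =====

-- character of column i in row j (default ' ' irrelevant under Pre_, but both ports share it)
def pvCh (strs : List String) (i j : ℕ) : Char := (strs[j]?.getD "").toList[i]?.getD ' '

-- "row j descends to row j+1 in column i"
def pvDesc (strs : List String) (i j : ℕ) : Bool := decide (pvCh strs i (j + 1) < pvCh strs i j)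

-- "column i has a descent among the first k adjacent row pairs"
def pvBad (strs : List String) (k i : ℕ) : Bool := (List.range k).any (fun j => pvDesc strs i j)

theorem pvBad_succ (strs : List String) (k i : ℕ) :
    pvBad strs (k + 1) i = (pvBad strs k i || pvDesc strs i k) := by
  simp [pvBad, List.range_succ]

theorem pv_countP_or {α : Type} (p q : α → Bool) (l : List α) :
    List.countP (fun x => p x || q x) l
      = List.countP p l + List.countP (fun x => !p x && q x) l := by
  induction l with
  | nil => simp
  | cons x xs ih =>
    simp only [List.countP_cons, ih]
    cases hp : p x <;> cases hq : q x <;> simp <;> omega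

theorem pv_set_map_range {m a : ℕ} (_h : a < m) (f : ℕ → Bool) (v : Bool) :
    ((List.range m).map f).set a v = (List.range m).map (fun i => if i = a then v else f i) := by
  apply List.ext_getElem
  · simp
  · intro i _ _
    simp only [List.getElem_set, List.getElem_map, List.getElem_range]
    rcases eq_or_ne a i with h | hne
    · simp [h]
    · simp [hne, Ne.symm hne]

theorem pw_of_adj (f : ℕ → Char) (n : ℕ) (h : ∀ j, j + 1 < n → f j ≤ f (j + 1)) :
    List.Pairwise (fun a b => a ≤ b) ((List.range n).map f) := by
  rw [List.pairwise_map, List.pairwise_iff_getElem]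
  intro i j hi hj hij
  simp only [List.length_range] at hi hj
  simp only [List.getElem_range]
  have key : ∀ d k, k + d < n → f k ≤ f (k + d) := by
    intro d
    induction d with
    | zero => simp
    | succ d ih =>
      intro k hkd
      calc f k ≤ f (k + d) := ih k (by omega)
        _ ≤ f (k + d + 1) := h (k + d) (by omega)
  have := key (j - i) i (by omega)
  rwa [Nat.add_sub_cancel' (le_of_lt hij)] at this

theorem adj_of_pw (f : ℕ → Char) (n : ℕ)
    (h : List.Pairwise (fun a b => a ≤ b) ((List.range n).map f)) :
    ∀ j, j + 1 < n → f j ≤ f (j + 1) := by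
  rw [List.pairwise_map, List.pairwise_iff_getElem] at h
  intro j hj
  have := h j (j + 1) (by simp; omega) (by simpa using hj) (by omega)
  simpa using this

-- the column test of A equals the accumulated-descent test of B
theorem pv_col_test (strs : List String) (i : ℕ) :
    (decide (¬ (List.range strs.length).map (pvCh strs i)
        = PySem.List.sorted ((List.range strs.length).map (pvCh strs i)) (fun c => c)))
      = pvBad strs (strs.length - 1) i := by
  set n := strs.length with hn
  set l := (List.range n).map (pvCh strs i) with hl
  by_cases hpw : List.Pairwise (fun a b : Char => a ≤ b) l
  · have hs : PySem.List.sorted l (fun c => c) = l :=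
      PySem.List.sorted_eq_self_of_pairwise l (fun c => c) hpw
    have : pvBad strs (n - 1) i = false := by
      simp only [pvBad]
      rw [List.any_eq_false]
      intro j hj
      rw [List.mem_range] at hj
      have := adj_of_pw (pvCh strs i) n hpw j (by omega)
      simp [pvDesc, not_lt.mpr this]
    simp [hs, this]
  · have hs : l ≠ PySem.List.sorted l (fun c => c) := by
      intro he
      exact hpw (by rw [he]; exact PySem.List.sorted_pairwise l (fun c => c))
    have : pvBad strs (n - 1) i = true := by
      by_contra hb
      apply hpw
      apply pw_of_adj
      intro j hj
      rw [Bool.not_eq_true] at hb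
      simp only [pvBad] at hb
      rw [List.any_eq_false] at hb
      have h5 := hb j (by rw [List.mem_range]; omega)
      simpa [pvDesc, not_lt] using h5
    simp [hs, this]

-- inner loop of B: one row pair, swept over all columns
theorem pv_inner (m : ℕ) (b d : ℕ → Bool) :
    ∀ (a : ℕ), a ≤ m → ∀ (ans : Int),
    (List.range a).foldl (fun st i =>
        if !(st.1.getD i false) && d i then (st.1.set i true, st.2 + 1) else st)
      ((List.range m).map b, ans)
    = ((List.range m).map (fun i => if i < a then b i || d i else b i),
       ans + (List.countP (fun i => !b i && d i) (List.range a) : Int)) := by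
  intro a
  induction a with
  | zero => simp
  | succ a ih =>
    intro ha ans
    rw [List.range_succ, List.foldl_append, ih (by omega)]
    simp only [List.foldl_cons, List.foldl_nil]
    have hget : (((List.range m).map (fun i => if i < a then b i || d i else b i)).getD a false)
        = b a := by
      rw [PySem.List.getD_map_range _ _ _ _ (by omega)]
      simp
    rw [List.countP_append, List.countP_singleton]
    by_cases hc : (!b a && d a) = true
    · have hba : b a = false := by revert hc; cases b a <;> simp
      have hda : d a = true := by revert hc; cases d a <;> simp [hba]
      simp only [hget, if_pos hc, Prod.mk.injEq]
      constructor
      · rw [pv_set_map_range (by omega)]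
        apply List.map_congr_left
        intro i _
        by_cases h1 : i = a
        · simp [h1, hba, hda]
        · have h2 : (i < a + 1) ↔ i < a := by omega
          simp [h1, h2]
      · push_cast
        ring
    · simp only [hget, if_neg hc, Prod.mk.injEq]
      constructor
      · apply List.map_congr_left
        intro i _
        by_cases h1 : i = a
        · subst h1
          cases hba : b i <;> cases hda : d i <;> simp_all
        · have h2 : (i < a + 1) ↔ i < a := by omega
          simp [h2]
      · push_cast
        ring

-- outer loop of B over the first k row pairs
theorem pv_outer (strs : List String) (m : ℕ) :
    ∀ (k : ℕ),
    (List.range k).foldl (fun st j =>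
        (List.range m).foldl (fun st i =>
            if !(st.1.getD i false) && pvDesc strs i j then (st.1.set i true, st.2 + 1) else st) st)
      ((List.range m).map (pvBad strs 0), 0)
    = ((List.range m).map (pvBad strs k),
       (List.countP (pvBad strs k) (List.range m) : Int)) := by
  intro k
  induction k with
  | zero =>
    have h0 : List.countP (pvBad strs 0) (List.range m) = 0 := by
      rw [List.countP_eq_zero]
      intro x _
      simp [pvBad]
    simp [h0]
  | succ k ih =>
    rw [List.range_succ, List.foldl_append, ih]
    simp only [List.foldl_cons, List.foldl_nil]
    rw [pv_inner m (pvBad strs k) (fun i => pvDesc strs i k) m (le_refl m)]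
    refine Prod.ext ?_ ?_
    · apply List.map_congr_left
      intro i hi
      rw [List.mem_range] at hi
      simp [hi, pvBad_succ]
    · simp only
      have : List.countP (pvBad strs (k + 1)) (List.range m)
          = List.countP (pvBad strs k) (List.range m)
            + List.countP (fun i => !pvBad strs k i && pvDesc strs i k) (List.range m) := by
        rw [← pv_countP_or]
        apply List.countP_congr
        intro i _
        simp [pvBad_succ]
      rw [this]
      push_cast
      ring

theorem pv_A_eq (strs : List String) :
    minDeletionSize strs
      = (List.countP (fun i => decide (¬ (List.range strs.length).map (pvCh strs i)
            = PySem.List.sorted ((List.range strs.length).map (pvCh strs i)) (fun c => c)))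
          (List.range ((strs[0]?.getD "").toList.length)) : Int) := by
  unfold minDeletionSize
  simp only [PySem.Str.len_eq, PySem.List.pyGet?_zero]
  rw [PySem.List.pyRange_zero_nat ((strs[0]?.getD "").toList.length), List.foldl_map]
  have hs : ∀ iN : ℕ,
      (PySem.List.pyRange 0 (strs.length : Int) 1).foldl
        (fun s j => s ++ [(PySem.Str.pyGet? ((PySem.List.pyGet? strs j).getD "") (iN : Int)).getD ' ']) []
      = (List.range strs.length).map (pvCh strs iN) := by
    intro iN
    rw [PySem.List.foldl_append_singleton_eq_map, PySem.List.pyRange_zero_nat, List.map_map]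
    simp [Function.comp, pvCh]
  simp only [hs]
  refine Eq.trans (PySem.List.foldl_congr_mem _ _
    (fun (ans : Int) (iN : ℕ) =>
      if decide (¬ (List.range strs.length).map (pvCh strs iN)
          = PySem.List.sorted ((List.range strs.length).map (pvCh strs iN)) (fun c => c)) = true
      then ans + 1 else ans) 0 ?_) ?_
  · intro acc x _
    exact if_congr (by simp) rfl rfl
  · rw [PySem.List.foldl_count_if]
    simp

theorem pv_B_eq (strs : List String) :
    minDeletionSize_alt strs
      = (List.countP (pvBad strs (strs.length - 1))
          (List.range ((strs[0]?.getD "").toList.length)) : Int) := by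
  unfold minDeletionSize_alt
  simp only [PySem.Str.len_eq, PySem.List.pyGet?_zero]
  set m := (strs[0]?.getD "").toList.length with hm
  have hrepl : List.replicate m false = (List.range m).map (pvBad strs 0) := by
    apply List.ext_getElem
    · simp
    · intro i h1 h2
      simp [pvBad]
  have hinner : ∀ (jN : ℕ) (st : List Bool × Int),
      (PySem.List.pyRange 0 (m : Int) 1).foldl (fun st i =>
        if !(PySem.List.pyGetD st.1 i false) &&
           decide ((PySem.Str.pyGet? ((PySem.List.pyGet? strs ((jN : Int) + 1)).getD "") i).getD ' '
             < (PySem.Str.pyGet? ((PySem.List.pyGet? strs (jN : Int)).getD "") i).getD ' ')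
        then (PySem.List.pySetD st.1 i true, st.2 + 1) else st) st
      = (List.range m).foldl (fun st i =>
          if !(st.1.getD i false) && pvDesc strs i jN then (st.1.set i true, st.2 + 1) else st) st := by
    intro jN st
    rw [PySem.List.pyRange_zero_nat, List.foldl_map]
    apply PySem.List.foldl_congr_mem
    intro acc i _
    have h2 : PySem.List.pyGet? strs ((jN : Int) + 1) = strs[jN + 1]? := by
      have h3 : ((jN : Int) + 1) = ((jN + 1 : ℕ) : Int) := by push_cast; ring
      rw [h3, PySem.List.pyGet?_natCast]
    simp only [pvDesc, pvCh, h2, PySem.List.pyGetD_natCast, PySem.List.pySetD_natCast,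
      PySem.Str.pyGet?_natCast, PySem.List.pyGet?_natCast]
    rfl
  by_cases hnil : strs = []
  · subst hnil
    have he : PySem.List.pyRange 0 ((([] : List String).length : Int) - 1) 1 = [] :=
      PySem.List.pyRange_one_eq_nil (by simp)
    rw [he]
    simp only [List.foldl_nil]
    have h0 : List.countP (pvBad ([] : List String) (([] : List String).length - 1))
        (List.range m) = 0 := by
      rw [List.countP_eq_zero]
      intro x _
      simp [pvBad]
    rw [h0]
    simp
  · have hlen : 1 ≤ strs.length := by
      cases strs with
      | nil => exact absurd rfl hnil
      | cons a l => simp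
    have hcast : ((strs.length : Int) - 1) = ((strs.length - 1 : ℕ) : Int) := by
      push_cast [hlen]; ring
    rw [hcast, PySem.List.pyRange_zero_nat (strs.length - 1), List.foldl_map]
    simp only [hinner]
    simp only [Int.toNat_natCast]
    rw [hrepl, pv_outer strs m (strs.length - 1)]

-- ===== VERDICT (by name: the statement is the Claim_ definition above) =====
theorem minDeletionSize_spec : Claim_equal_minDeletionSize := by
  intro strs _ _
  unfold Spec_minDeletionSize
  rw [pv_A_eq, pv_B_eq]
  congr 1
  apply List.countP_congr
  intro i _
  rw [pv_col_test]
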